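-- pv_equiv track=rewrite | github.com/gh0stintheshe11/LeetCode-Solutions | solutions/1569.number-of-ways-to-reorder-array-to-get-same-bst/Python3.py | numOfWays
-- ===== SOURCE A (Python) =====
-- from typing import List
--
-- from math import comb
-- from functools import lru_cache
--
-- MOD = 10**9 + 7
--
-- def numOfWays(nums: List[int]) -> int:
--     @lru_cache(None)
--     def count_ways(arr):
--         if len(arr) <= 2:
--             return 1
--
--         root = arr[0]
--         left = [x for x in arr if x < root]
--         right = [x for x in arr if x > root]
--
--         left_ways = count_ways(tuple(left))
--         right_ways = count_ways(tuple(right))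
--
--         total_ways = comb(len(left) + len(right), len(left))
--         return (total_ways * left_ways % MOD * right_ways % MOD) % MOD
--
--     return (count_ways(tuple(nums)) - 1) % MOD
-- ===== SOURCE B (Python) =====
-- from math import comb
--
-- MOD = 10**9 + 7
--
-- def numOfWays(nums):
--     # Build the BST explicitly by inserting in order (equal values merge into a
--     # counted node), then one post-order pass multiplies the interleaving
--     # binomials; same value as A for every input.
--     def insert(t, v):
--         if t is None:
--             return (v, 1, None, None)
--         w, c, l, r = t
--         if v < w:
--             return (w, c, insert(l, v), r)
--         if v > w:
--             return (w, c, l, insert(r, v))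
--         return (w, c + 1, l, r)
--
--     t = None
--     for v in nums:
--         t = insert(t, v)
--
--     def post(t):
--         if t is None:
--             return (0, 1)
--         _, c, l, r = t
--         ls, lw = post(l)
--         rs, rw = post(r)
--         return (c + ls + rs, comb(ls + rs, ls) * lw * rw % MOD)
--
--     return (post(t)[1] - 1) % MOD
-- ===== Notes on version B (the rewrite author's own statement) =====
-- stated objective: alternative
-- what changed: Replaces A's memoized recursion that re-filters value-partitioned sublists with an explicit BST built once by insertion (duplicates merged into counted nodes) followed by a single post-order pass multiplying the interleaving binomials mod 1e9+7.
import Mathlib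
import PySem

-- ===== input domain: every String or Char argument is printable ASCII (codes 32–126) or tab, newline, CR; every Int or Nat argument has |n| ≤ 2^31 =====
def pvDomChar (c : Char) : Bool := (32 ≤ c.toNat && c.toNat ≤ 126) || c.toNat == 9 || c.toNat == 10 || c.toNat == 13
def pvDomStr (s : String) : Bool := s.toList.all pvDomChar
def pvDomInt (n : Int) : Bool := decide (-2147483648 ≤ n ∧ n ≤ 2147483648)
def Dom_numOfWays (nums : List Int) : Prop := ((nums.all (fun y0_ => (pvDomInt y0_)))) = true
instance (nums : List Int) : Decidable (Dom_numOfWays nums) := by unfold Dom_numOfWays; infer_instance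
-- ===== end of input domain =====

-- B rebuilds the answer from an explicit BST (built by insertion, equal values
-- merged into counted nodes) and one post-order pass, instead of A's recursive
-- list partitioning; objective: alternative algorithm, same exact value.

-- ===== PORT A =====
-- math.comb: exact here since it is only applied with 0 ≤ k ≤ n
def pyComb (n k : Nat) : Int := (n.choose k : Int)

def pvMOD : Int := 1000000007

def countWays (arr : List Int) : Int :=
  if arr.length ≤ 2 then 1
  else
    match arr with
    | [] => 1  -- unreachable: length > 2
    | root :: t =>
      let left := (root :: t).filter (fun x => x < root)
      let right := (root :: t).filter (fun x => root < x)
      let left_ways := countWays left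
      let right_ways := countWays right
      let total_ways := pyComb (left.length + right.length) left.length
      PySem.Int.mod (PySem.Int.mod (PySem.Int.mod (total_ways * left_ways) pvMOD * right_ways) pvMOD) pvMOD
termination_by arr.length
decreasing_by
  · simp only [List.filter_cons, lt_irrefl, decide_false, List.length_cons]
    exact Nat.lt_succ_of_le (List.length_filter_le _ _)
  · simp only [List.filter_cons, lt_irrefl, decide_false, List.length_cons]
    exact Nat.lt_succ_of_le (List.length_filter_le _ _)

def numOfWays (nums : List Int) : Int :=
  PySem.Int.mod (countWays nums - 1) pvMOD

-- ===== PORT B =====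
-- node: value, multiplicity (a positive Python int, represented as Nat), children
inductive BTree where
  | leaf : BTree
  | node : Int → Nat → BTree → BTree → BTree
deriving DecidableEq, Repr

def bInsert : BTree → Int → BTree
  | .leaf, v => .node v 1 .leaf .leaf
  | .node w c l r, v =>
    if v < w then .node w c (bInsert l v) r
    else if w < v then .node w c l (bInsert r v)
    else .node w (c + 1) l r

-- post-order pass: (subtree size, ways % MOD)
def bPost : BTree → Nat × Int
  | .leaf => (0, 1)
  | .node _ c l r =>
    let lp := bPost l
    let rp := bPost r
    (c + lp.1 + rp.1, PySem.Int.mod (pyComb (lp.1 + rp.1) lp.1 * lp.2 * rp.2) pvMOD)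

def numOfWays_alt (nums : List Int) : Int :=
  PySem.Int.mod ((bPost (nums.foldl bInsert .leaf)).2 - 1) pvMOD

-- ===== PRECONDITION & SPEC =====
def Spec_numOfWays (nums : List Int) (out : Int) : Prop := out = numOfWays_alt nums
instance (nums : List Int) (out : Int) : Decidable (Spec_numOfWays nums out) := by unfold Spec_numOfWays; infer_instance

-- ===== CLAIM (what is proved, stated in full; the proofs are below) =====
def Claim_equal_numOfWays : Prop := ∀ (nums : List Int), Dom_numOfWays nums → Spec_numOfWays nums (numOfWays nums)

-- ===== LEMMAS AND PROOFS =====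

-- inserting a whole list into a node splits into the two subtrees
theorem foldl_bInsert_node (xs : List Int) (w : Int) (c : Nat) (l r : BTree) :
    xs.foldl bInsert (.node w c l r) =
      .node w (c + xs.count w)
        ((xs.filter (fun x => x < w)).foldl bInsert l)
        ((xs.filter (fun x => w < x)).foldl bInsert r) := by
  induction xs generalizing c l r with
  | nil => simp
  | cons x xs ih =>
    rcases lt_trichotomy x w with h | h | h
    · simp [List.foldl_cons, bInsert, h, not_lt_of_gt h, ih, ne_of_lt h]
    · subst h
      simp [List.foldl_cons, bInsert, ih, Nat.add_comm, Nat.add_left_comm]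
    · simp [List.foldl_cons, bInsert, h, not_lt_of_gt h, ih, (ne_of_lt h).symm]

-- the three-way partition of a list by comparison with w
theorem partition_length (t : List Int) (w : Int) :
    (t.filter (fun x => x < w)).length + (t.filter (fun x => w < x)).length + t.count w
      = t.length := by
  induction t with
  | nil => simp
  | cons x xs ih =>
    rcases lt_trichotomy x w with h | h | h
    · simp [h, not_lt_of_gt h, ne_of_lt h]; omega
    · subst h; simp; omega
    · simp [h, not_lt_of_gt h, (ne_of_lt h).symm]; omega

-- the size component of the post-order pass is the length of the inserted list
theorem bPost_size (l : List Int) : (bPost (l.foldl bInsert .leaf)).1 = l.length := by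
  induction hn : l.length using Nat.strong_induction_on generalizing l with
  | _ n ih =>
    match l with
    | [] => simp [bPost] at hn ⊢; omega
    | r :: t =>
      have hL := List.length_filter_le (fun x => decide (x < r)) t
      have hR := List.length_filter_le (fun x => decide (r < x)) t
      simp only [List.foldl_cons, bInsert, foldl_bInsert_node, bPost, List.length_cons] at *
      rw [ih _ (by omega) _ rfl, ih _ (by omega) _ rfl]
      have := partition_length t r
      omega

theorem mod_mul_assoc (a b c : Int) :
    PySem.Int.mod (PySem.Int.mod (PySem.Int.mod (a * b) pvMOD * c) pvMOD) pvMOD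
      = PySem.Int.mod (a * b * c) pvMOD := by
  have hM : (0:Int) < pvMOD := by norm_num [pvMOD]
  simp only [PySem.Int.mod_eq_emod_of_pos hM]
  rw [Int.emod_emod_of_dvd _ dvd_rfl]
  conv_lhs => rw [Int.mul_emod, Int.emod_emod_of_dvd _ dvd_rfl, ← Int.mul_emod]

-- the main invariant: A's recursive count equals B's post-order product
theorem countWays_eq (arr : List Int) :
    countWays arr = (bPost (arr.foldl bInsert .leaf)).2 := by
  induction hn : arr.length using Nat.strong_induction_on generalizing arr with
  | _ n ih =>
    by_cases h2 : arr.length ≤ 2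
    · rw [countWays.eq_def]
      simp only [h2, if_true]
      match arr, h2 with
      | [], _ => simp [bPost]
      | [a], _ =>
        simp [bInsert, bPost, pyComb, PySem.Int.mod_eq_emod_of_pos (by norm_num [pvMOD] : (0:Int) < pvMOD)]
        norm_num [pvMOD]
      | [a, b], _ =>
        have hone : PySem.Int.mod 1 pvMOD = 1 := by decide
        rcases lt_trichotomy a b with h | h | h
        · simp [bInsert, h, not_lt_of_gt h, bPost, pyComb, hone]
        · subst h; simp [bInsert, bPost, pyComb, hone]
        · simp [bInsert, h, not_lt_of_gt h, bPost, pyComb, hone]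
    · match arr with
      | root :: t =>
        rw [countWays.eq_def]
        simp only [h2, if_false]
        have hfl : (root :: t).filter (fun x => x < root) = t.filter (fun x => x < root) := by
          simp
        have hfr : (root :: t).filter (fun x => root < x) = t.filter (fun x => root < x) := by
          simp
        have hL := List.length_filter_le (fun x => decide (x < root)) t
        have hR := List.length_filter_le (fun x => decide (root < x)) t
        have hlen : (root :: t).length = n := hn
        simp only [List.length_cons] at hlen
        rw [hfl, hfr]
        rw [ih (t.filter (fun x => x < root)).length (by omega) _ rfl,
            ih (t.filter (fun x => root < x)).length (by omega) _ rfl]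
        simp only [List.foldl_cons, bInsert, foldl_bInsert_node, bPost]
        rw [bPost_size, bPost_size, mod_mul_assoc]

-- ===== VERDICT (by name: the statement is the Claim_ definition above) =====
theorem numOfWays_spec : Claim_equal_numOfWays := by
  intro nums _
  show numOfWays nums = numOfWays_alt nums
  unfold numOfWays numOfWays_alt
  rw [countWays_eq]
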